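-- pv_equiv track=rewrite | github.com/zenniskayy2k4/CTF-Archive | PascalCTF/wordy/solve.py | index_to_word
-- ===== SOURCE A (Python) =====
-- ALPHABET = "abcdefghijklmnop"
--
-- L = 5
--
-- K = len(ALPHABET)
--
-- def index_to_word(idx: int) -> str:
--     digits = []
--     x = idx
--     for _ in range(L):
--         digits.append(x % K)
--         x //= K
--     letters = [ALPHABET[d] for d in reversed(digits)]
--     return "".join(letters)
-- ===== SOURCE B (Python) =====
-- ALPHABET = "abcdefghijklmnop"
--
-- L = 5
--
-- K = len(ALPHABET)
--
-- _TRANS = str.maketrans("0123456789abcdef", ALPHABET)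
--
-- def index_to_word(idx: int) -> str:
--     n = idx % (K ** L)
--     return format(n, "05x").translate(_TRANS)
-- ===== Notes on version B (the rewrite author's own statement) =====
-- stated objective: idiomatic
-- what changed: Replaces the manual low-to-high digit-extraction loop plus reversal with a closed form: reduce the index modulo K**L once, produce the five hex digits high-to-low with zero-padded hex formatting, and map them to the alphabet with str.translate.
import Mathlib
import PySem

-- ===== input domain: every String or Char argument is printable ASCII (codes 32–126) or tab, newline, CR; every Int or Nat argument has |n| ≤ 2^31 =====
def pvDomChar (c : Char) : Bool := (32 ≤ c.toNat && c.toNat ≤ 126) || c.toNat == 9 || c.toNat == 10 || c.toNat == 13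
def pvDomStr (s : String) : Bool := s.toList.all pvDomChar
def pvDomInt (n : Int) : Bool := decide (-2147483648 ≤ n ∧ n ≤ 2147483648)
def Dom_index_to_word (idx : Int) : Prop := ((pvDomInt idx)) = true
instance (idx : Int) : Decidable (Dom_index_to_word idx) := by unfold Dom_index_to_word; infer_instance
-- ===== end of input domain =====

-- B replaces A's manual low-to-high digit loop plus reversal with a closed form:
-- reduce idx modulo 16^5 once, format the five base-16 digits high-to-low, translate them to the alphabet (idiomatic).

-- ===== PORT A =====
-- ALPHABET = "abcdefghijklmnop" as a char list (strings are ported on the list side)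
def pvAlphabet : List Char := ['a','b','c','d','e','f','g','h','i','j','k','l','m','n','o','p']

-- ALPHABET[d]: the index d = x % 16 is always in [0,16), so the default of pyGetD is never used
def index_to_word (idx : Int) : String :=
  let st := (PySem.List.pyRange 0 5 1).foldl
      (fun (st : List Int × Int) _ =>
        (st.1 ++ [PySem.Int.mod st.2 16], PySem.Int.floordiv st.2 16))
      (([] : List Int), idx)
  let letters := st.1.reverse.map (fun d => PySem.List.pyGetD pvAlphabet d 'a')
  String.mk letters

-- ===== PORT B =====
def pvHexDigits : List Char := ['0','1','2','3','4','5','6','7','8','9','a','b','c','d','e','f']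

-- format(n, '05x') for 0 ≤ n < 16^5: the five hex digits high-to-low (exact on this range)
def pvFormat05x (m : Nat) : List Char :=
  (List.range 5).map (fun i => pvHexDigits.getD (m / 16 ^ (4 - i) % 16) '0')

-- str.maketrans('0123456789abcdef', ALPHABET) + str.translate: per-char table lookup (identity if absent)
def pvTransTable : List (Char × Char) := pvHexDigits.zip pvAlphabet

def pvTranslate (c : Char) : Char :=
  ((pvTransTable.find? (fun p => p.1 == c)).map Prod.snd).getD c

def index_to_word_alt (idx : Int) : String :=
  let n := PySem.Int.mod idx 1048576
  String.mk ((pvFormat05x n.toNat).map pvTranslate)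

-- ===== PRECONDITION & SPEC =====
def Spec_index_to_word (idx : Int) (out : String) : Prop := out = index_to_word_alt idx
instance (idx : Int) (out : String) : Decidable (Spec_index_to_word idx out) := by unfold Spec_index_to_word; infer_instance

-- ===== CLAIM (what is proved, stated in full; the proofs are below) =====
def Claim_equal_index_to_word : Prop := ∀ (idx : Int), Dom_index_to_word idx → Spec_index_to_word idx (index_to_word idx)

-- ===== LEMMAS AND PROOFS =====

-- translating the d-th hex digit gives the d-th alphabet letter
theorem pv_translate_hex (d : Nat) (h : d < 16) :
    pvTranslate (pvHexDigits.getD d '0') = pvAlphabet.getD d 'a' := by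
  interval_cases d <;> rfl

-- digit q-slice of x agrees with that of x % 16^5 when 16 ∣ 16^5 / q
theorem pv_keyc (x q : Int) (hq : q ≠ 0) (k : Int) (hm : (16 * k) * q = 1048576) :
    x / q % 16 = (x % 1048576) / q % 16 := by
  have h : x = x % 1048576 + (16 * (k * (x / 1048576))) * q := by
    calc x = x % 1048576 + 1048576 * (x / 1048576) := (Int.emod_add_mul_ediv x 1048576).symm
    _ = _ := by rw [← hm]; ring
  conv_lhs => rw [h]
  rw [Int.add_mul_ediv_right _ _ hq, Int.add_mul_emod_self_left]

-- one output character: A's letter for digit (x0 / qn) % 16 equals B's translated hex digit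
theorem pv_char (y x0 : Int) (qn m : Nat) (hq : 0 < qn) (k : Int)
    (hm : (16 * k) * (qn : Int) = 1048576) (hy : y = x0 / (qn : Int))
    (hmm : m = (x0 % 1048576).toNat / qn % 16) :
    PySem.List.pyGetD pvAlphabet (y % 16) 'a'
      = pvTranslate (pvHexDigits[m]?.getD '0') := by
  subst hy; subst hmm
  have hgd : pvHexDigits[(x0 % 1048576).toNat / qn % 16]?.getD '0'
      = pvHexDigits.getD ((x0 % 1048576).toNat / qn % 16) '0' := rfl
  rw [hgd, pv_translate_hex _ (Nat.mod_lt _ (by norm_num))]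
  have h1 : (0:Int) ≤ x0 / (qn:Int) % 16 := Int.emod_nonneg _ (by norm_num)
  have h2 : x0 / (qn:Int) % 16 < 16 := Int.emod_lt_of_pos _ (by norm_num)
  rw [PySem.List.pyGetD_eq_getElem pvAlphabet 'a' h1 (by simpa [pvAlphabet] using h2)]
  have hr : (0:Int) ≤ x0 % 1048576 := Int.emod_nonneg _ (by norm_num)
  have hkey : x0 / (qn:Int) % 16 = ((x0 % 1048576).toNat / qn % 16 : Nat) := by
    rw [pv_keyc x0 _ (by positivity) k hm]
    push_cast
    rw [Int.toNat_of_nonneg hr]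
  rw [List.getD_eq_getElem pvAlphabet 'a' (by simp [pvAlphabet]; exact Nat.mod_lt _ (by norm_num))]
  congr 1
  omega

theorem pv_main (idx : Int) : index_to_word idx = index_to_word_alt idx := by
  unfold index_to_word index_to_word_alt pvFormat05x
  simp only [show PySem.List.pyRange 0 5 1 = [0,1,2,3,4] from by decide,
    show List.range 5 = [0,1,2,3,4] from by decide,
    List.foldl, List.reverse, List.reverseAux, List.map_cons, List.map_nil,
    List.nil_append, List.cons_append]
  have hf : ∀ y : Int, PySem.Int.floordiv y 16 = y / 16 :=
    fun y => PySem.Int.floordiv_eq_ediv_of_pos (by norm_num)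
  refine congrArg String.mk ?_
  norm_num [hf, Int.ediv_ediv_of_nonneg (by norm_num : (0:Int) ≤ 16), List.cons.injEq]
  refine ⟨?_, ?_, ?_, ?_, ?_⟩
  · exact pv_char _ idx 65536 _ (by norm_num) 1 (by norm_num)
      (by rw [Int.ediv_ediv_of_nonneg (by norm_num : (0:Int) ≤ 256)]; norm_num) rfl
  · exact pv_char _ idx 4096 _ (by norm_num) 16 (by norm_num)
      (by rw [Int.ediv_ediv_of_nonneg (by norm_num : (0:Int) ≤ 256)]; norm_num) rfl
  · exact pv_char _ idx 256 _ (by norm_num) 256 (by norm_num) (by norm_num) rfl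
  · exact pv_char _ idx 16 _ (by norm_num) 4096 (by norm_num) (by norm_num) rfl
  · exact pv_char _ idx 1 _ (by norm_num) 65536 (by norm_num) (by norm_num)
      (by norm_num)

-- ===== VERDICT (by name: the statement is the Claim_ definition above) =====
theorem index_to_word_spec : Claim_equal_index_to_word := by
  intro idx _
  unfold Spec_index_to_word
  exact pv_main idx
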